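-- pv_equiv track=rewrite | github.com/wiserxin/predict | read0.2.py | get_sum_of_everyday
-- ===== SOURCE A (Python) =====
-- def get_sum_of_everyday(number, sorted_middle):
--
--     count_by_day = {}
--
--     for i in sorted_middle:
--         if(i[1]==number):
--             if(i[2] in count_by_day):
--                 count_by_day[i[2]] += i[3]
--                 pass
--             else:
--                 count_by_day[i[2]] = i[3]
--             pass
--         else:
--             pass
--     return count_by_day;
-- ===== SOURCE B (Python) =====
-- def get_sum_of_everyday(number, sorted_middle):
--     rows = [(i[2], i[3]) for i in sorted_middle if i[1] == number]
--     days = list(dict.fromkeys(day for day, _ in rows))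
--     return {day: sum(v for d, v in rows if d == day) for day in days}
-- ===== Notes on version B (the rewrite author's own statement) =====
-- stated objective: alternative
-- what changed: B replaces A's single-pass dict accumulator with a staged pipeline: collect the matching (day, value) pairs, take the first-occurrence-ordered distinct days with dict.fromkeys, then build the result by a per-day filter-and-sum comprehension.
import Mathlib
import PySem

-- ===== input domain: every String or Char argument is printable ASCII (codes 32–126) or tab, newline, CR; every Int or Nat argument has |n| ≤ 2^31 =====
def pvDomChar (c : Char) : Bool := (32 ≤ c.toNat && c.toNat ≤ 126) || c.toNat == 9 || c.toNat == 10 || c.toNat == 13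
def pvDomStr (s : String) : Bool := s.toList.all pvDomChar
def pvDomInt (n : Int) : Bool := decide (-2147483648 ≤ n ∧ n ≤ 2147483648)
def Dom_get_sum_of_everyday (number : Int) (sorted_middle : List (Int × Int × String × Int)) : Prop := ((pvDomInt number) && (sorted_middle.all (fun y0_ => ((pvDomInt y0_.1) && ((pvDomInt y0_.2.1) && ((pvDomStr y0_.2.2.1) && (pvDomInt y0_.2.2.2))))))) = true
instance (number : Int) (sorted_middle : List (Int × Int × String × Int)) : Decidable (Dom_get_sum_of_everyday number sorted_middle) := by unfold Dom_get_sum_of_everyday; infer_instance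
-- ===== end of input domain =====

-- B replaces A's single-pass dict accumulator with a staged pipeline: matching rows,
-- first-occurrence distinct days, then a per-day filter-and-sum. (objective: alternative)

-- ===== PORT A =====
-- count_by_day = {}; for i in sorted_middle: if i[1]==number: add/init count_by_day[i[2]] with i[3]
def get_sum_of_everyday (number : Int) (sorted_middle : List (Int × Int × String × Int)) : List (String × Int) :=
  (sorted_middle.foldl (fun d i =>
      if i.2.1 == number then
        if d.contains i.2.2.1 then
          d.insert i.2.2.1 (d.getD i.2.2.1 0 + i.2.2.2)   -- count_by_day[i[2]] += i[3]
        else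
          d.insert i.2.2.1 i.2.2.2                         -- count_by_day[i[2]] = i[3]
      else d)
    (PySem.Dict.empty : PySem.Dict String Int)).items

-- ===== PORT B =====
-- rows = [(i[2], i[3]) for matching i]; days = list(dict.fromkeys(...)); {day: sum(v for d,v in rows if d == day)}
def get_sum_of_everyday_alt (number : Int) (sorted_middle : List (Int × Int × String × Int)) : List (String × Int) :=
  let rows := (sorted_middle.filter (fun i => i.2.1 == number)).map (fun i => (i.2.2.1, i.2.2.2))
  let days := PySem.List.dedup (rows.map Prod.fst)
  days.map (fun day => (day, ((rows.filter (fun p => p.1 == day)).map Prod.snd).sum))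

-- ===== PRECONDITION & SPEC =====
def Spec_get_sum_of_everyday (number : Int) (sorted_middle : List (Int × Int × String × Int)) (out : List (String × Int)) : Prop := out = get_sum_of_everyday_alt number sorted_middle
instance (number : Int) (sorted_middle : List (Int × Int × String × Int)) (out : List (String × Int)) : Decidable (Spec_get_sum_of_everyday number sorted_middle out) := by unfold Spec_get_sum_of_everyday; infer_instance

-- ===== CLAIM (what is proved, stated in full; the proofs are below) =====
def Claim_equal_get_sum_of_everyday : Prop := ∀ (number : Int) (sorted_middle : List (Int × Int × String × Int)), Dom_get_sum_of_everyday number sorted_middle → Spec_get_sum_of_everyday number sorted_middle (get_sum_of_everyday number sorted_middle)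

-- ===== LEMMAS AND PROOFS =====

-- A's accumulation step, on the already-projected (day, value) pairs.
def pvStep (d : PySem.Dict String Int) (p : String × Int) : PySem.Dict String Int :=
  if d.contains p.1 then d.insert p.1 (d.getD p.1 0 + p.2) else d.insert p.1 p.2

theorem fold_items_spec (rows : List (String × Int)) :
    (rows.foldl pvStep (PySem.Dict.empty : PySem.Dict String Int)).items
      = (PySem.List.dedup (rows.map Prod.fst)).map
          (fun day => (day, ((rows.filter (fun p => p.1 == day)).map Prod.snd).sum)) := by
  induction rows using List.reverseRecOn with
  | nil => rfl
  | append_singleton t x ih =>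
    set D := t.foldl pvStep (PySem.Dict.empty : PySem.Dict String Int) with hD
    have hkeys : D.keys = PySem.List.dedup (t.map Prod.fst) := by
      show D.items.map Prod.fst = _
      rw [ih, List.map_map]
      simp [Function.comp_def]
    have hnodup : D.keys.Nodup := by
      rw [hkeys]; simp [PySem.List.dedup_eq_ofList, PySem.Set.nodup_ofList]
    rw [List.foldl_append, List.foldl_cons, List.foldl_nil, ← hD]
    rw [List.map_append, List.map_cons, List.map_nil]
    by_cases hmem : x.1 ∈ t.map Prod.fst
    · -- key already present
      have hc : D.contains x.1 = true := by
        rw [PySem.Dict.contains_eq_decide_mem_keys, hkeys]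
        simp [PySem.List.dedup_eq_ofList, PySem.Set.mem_ofList, hmem]
      have hded : PySem.List.dedup (t.map Prod.fst ++ [x.1]) = PySem.List.dedup (t.map Prod.fst) := by
        simp only [PySem.List.dedup_eq_ofList, PySem.Set.ofList_append_singleton]
        exact PySem.Set.add_of_mem (by simp [PySem.Set.mem_ofList, hmem])
      have hgetD : D.getD x.1 0 = ((t.filter (fun p => p.1 == x.1)).map Prod.snd).sum := by
        apply PySem.Dict.getD_of_mem_items D _ hnodup
        rw [ih]
        exact List.mem_map_of_mem (by simp [PySem.List.dedup_eq_ofList, PySem.Set.mem_ofList, hmem])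
      rw [pvStep, if_pos hc, PySem.Dict.items_insert_of_contains _ _ hc, ih, hded, List.map_map]
      apply List.map_congr_left
      intro day hday
      simp only [Function.comp_apply, List.filter_append]
      by_cases hdx : day = x.1
      · subst hdx
        simp [hgetD, add_comm]
      · have : (x.1 == day) = false := by simp [Ne.symm hdx]
        simp [hdx, this]
    · -- fresh key
      have hc : D.contains x.1 = false := by
        rw [PySem.Dict.contains_eq_decide_mem_keys, hkeys]
        simp [PySem.List.dedup_eq_ofList, PySem.Set.mem_ofList, hmem]
      have hded : PySem.List.dedup (t.map Prod.fst ++ [x.1]) = PySem.List.dedup (t.map Prod.fst) ++ [x.1] := by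
        simp only [PySem.List.dedup_eq_ofList, PySem.Set.ofList_append_singleton]
        exact PySem.Set.add_of_not_mem (by simp [PySem.Set.mem_ofList, hmem])
      have hfilt : t.filter (fun p => p.1 == x.1) = [] := by
        rw [List.filter_eq_nil_iff]
        intro p hp
        simp only [beq_iff_eq]
        intro h
        exact hmem (h ▸ List.mem_map_of_mem hp)
      rw [pvStep, if_neg (by simp [hc]), PySem.Dict.items_insert_of_not_contains _ _ hc, ih, hded,
          List.map_append, List.map_cons, List.map_nil]
      congr 1
      · apply List.map_congr_left
        intro day hday
        have hdm : day ∈ t.map Prod.fst := by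
          simpa [PySem.List.dedup_eq_ofList, PySem.Set.mem_ofList] using hday
        have hdx : (x.1 == day) = false := by
          simp only [beq_eq_false_iff_ne]; intro h; exact hmem (h ▸ hdm)
        simp [List.filter_append, hdx]
      · simp [List.filter_append, hfilt]

-- ===== VERDICT (by name: the statement is the Claim_ definition above) =====
theorem get_sum_of_everyday_spec : Claim_equal_get_sum_of_everyday := by
  intro number sm _
  unfold Spec_get_sum_of_everyday get_sum_of_everyday get_sum_of_everyday_alt
  have h1 : sm.foldl (fun d i =>
      if i.2.1 == number then
        if d.contains i.2.2.1 then d.insert i.2.2.1 (d.getD i.2.2.1 0 + i.2.2.2)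
        else d.insert i.2.2.1 i.2.2.2
      else d) (PySem.Dict.empty : PySem.Dict String Int)
      = ((sm.filter (fun i => i.2.1 == number)).map (fun i => (i.2.2.1, i.2.2.2))).foldl pvStep
          (PySem.Dict.empty : PySem.Dict String Int) := by
    rw [List.foldl_map, List.foldl_filter]
    rfl
  rw [h1, fold_items_spec]
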